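-- pv_equiv track=rewrite | github.com/h4ribote/takaro-module | takaro_module.py | decimal_to_base62
-- ===== SOURCE A (Python) =====
-- def decimal_to_base62(decimal:int):
--     alphabet = "0123456789abcdefghijklmnopqrstuvwxyzABCDEFGHIJKLMNOPQRSTUVWXYZ"
--     if decimal == 0:
--         return alphabet[0]
--     base62 = ""
--     while decimal:
--         decimal, remainder = divmod(decimal, 62)
--         base62 = alphabet[remainder] + base62
--     return base62
-- ===== SOURCE B (Python) =====
-- def decimal_to_base62(decimal: int):
--     alphabet = "0123456789abcdefghijklmnopqrstuvwxyzABCDEFGHIJKLMNOPQRSTUVWXYZ"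
--     if decimal == 0:
--         return alphabet[0]
--     # find the largest power of 62 not exceeding decimal
--     power = 1
--     while power * 62 <= decimal:
--         power *= 62
--     # extract digits most-significant-first by repeated division by the power
--     digits = []
--     while power > 0:
--         digits.append(alphabet[(decimal // power) % 62])
--         power //= 62
--     return "".join(digits)
-- ===== Notes on version B (the rewrite author's own statement) =====
-- stated objective: alternative
-- what changed: Instead of A's while-loop that extracts digits least-significant-first with divmod and prepends them to a string, B first finds the largest power of 62 not exceeding the input and then emits digits most-significant-first by dividing by successive powers, joining an appended list.
import Mathlib
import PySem

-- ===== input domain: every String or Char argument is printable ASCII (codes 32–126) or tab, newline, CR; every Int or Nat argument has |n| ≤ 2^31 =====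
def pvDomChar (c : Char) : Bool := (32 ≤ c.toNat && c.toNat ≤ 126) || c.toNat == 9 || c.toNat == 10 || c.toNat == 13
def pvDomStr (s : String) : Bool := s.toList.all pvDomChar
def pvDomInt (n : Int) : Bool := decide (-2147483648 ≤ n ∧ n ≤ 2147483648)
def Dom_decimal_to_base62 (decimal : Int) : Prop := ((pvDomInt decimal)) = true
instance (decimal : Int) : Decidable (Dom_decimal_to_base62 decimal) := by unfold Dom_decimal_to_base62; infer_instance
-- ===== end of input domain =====

-- B replaces A's least-significant-first divmod/prepend loop with a largest-power-of-62 search followed by most-significant-first digit extraction (alternative algorithm, same cost). A diverges on negative input, which Pre_ excludes.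


-- ===== PORT A =====
def pvAlphabet : List Char := "0123456789abcdefghijklmnopqrstuvwxyzABCDEFGHIJKLMNOPQRSTUVWXYZ".toList

-- A's while-loop: 'while decimal: decimal, remainder = divmod(decimal, 62); base62 = alphabet[remainder] + base62'.
-- Pre_ keeps the input nonnegative, so the loop condition 'decimal' is written as '0 < d' (which also makes the
-- recursion total). alphabet[remainder] is always in range, so pyGetD is exact.
def pvLoopA (d : Int) (acc : List Char) : List Char :=
  if 0 < d then
    pvLoopA (PySem.Int.floordiv d 62)
      (PySem.List.pyGetD pvAlphabet (PySem.Int.mod d 62) ' ' :: acc)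
  else acc
  termination_by d.toNat
  decreasing_by
    rw [PySem.Int.floordiv_eq_ediv_of_pos (by omega)]
    omega

def decimal_to_base62 (decimal : Int) : String :=
  if decimal = 0 then String.ofList [PySem.List.pyGetD pvAlphabet 0 ' ']
  else String.ofList (pvLoopA decimal [])

-- ===== PORT B =====
-- B's first loop: 'while power * 62 <= decimal: power *= 62'. power is always positive in B, which the extra
-- hypothesis records (it is what makes the loop terminate).
def pvPowB (power n : Int) (hp : 0 < power) : Int :=
  if h : power * 62 ≤ n then pvPowB (power * 62) n (by omega) else power
  termination_by (n - power).toNat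
  decreasing_by omega

-- B's second loop: 'while power > 0: digits.append(alphabet[(decimal // power) % 62]); power //= 62'.
def pvEmitB (power n : Int) (acc : List Char) : List Char :=
  if 0 < power then
    pvEmitB (PySem.Int.floordiv power 62) n
      (acc ++ [PySem.List.pyGetD pvAlphabet (PySem.Int.mod (PySem.Int.floordiv n power) 62) ' '])
  else acc
  termination_by power.toNat
  decreasing_by
    rw [PySem.Int.floordiv_eq_ediv_of_pos (by omega)]
    omega

def decimal_to_base62_alt (decimal : Int) : String :=
  if decimal = 0 then String.ofList [PySem.List.pyGetD pvAlphabet 0 ' ']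
  else String.ofList (pvEmitB (pvPowB 1 decimal (by omega)) decimal [])

-- ===== PRECONDITION & SPEC =====
-- Python A diverges on negative input (divmod floors, so 'decimal' never reaches 0); Pre_ excludes negatives.
def Pre_decimal_to_base62 (decimal : Int) : Prop := 0 ≤ decimal
instance (decimal : Int) : Decidable (Pre_decimal_to_base62 decimal) := by unfold Pre_decimal_to_base62; infer_instance
def pvWitness_decimal_to_base62 : Int := (12345)

def Spec_decimal_to_base62 (decimal : Int) (out : String) : Prop := out = decimal_to_base62_alt decimal
instance (decimal : Int) (out : String) : Decidable (Spec_decimal_to_base62 decimal out) := by unfold Spec_decimal_to_base62; infer_instance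

-- ===== CLAIM (what is proved, stated in full; the proofs are below) =====
def Claim_equal_decimal_to_base62 : Prop := ∀ (decimal : Int), Dom_decimal_to_base62 decimal → Pre_decimal_to_base62 decimal → Spec_decimal_to_base62 decimal (decimal_to_base62 decimal)

-- ===== LEMMAS AND PROOFS =====

-- Canonical most-significant-first digit string of n (proof helper; neither port uses it).
def pvDigits (n : Int) : List Char :=
  if 0 < n then
    pvDigits (PySem.Int.floordiv n 62) ++ [PySem.List.pyGetD pvAlphabet (PySem.Int.mod n 62) ' ']
  else []
  termination_by n.toNat
  decreasing_by
    rw [PySem.Int.floordiv_eq_ediv_of_pos (by omega)]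
    omega

-- A's accumulator loop equals the canonical digits with the pending suffix appended.
theorem pvLoopA_eq_digits : ∀ (k : Nat) (n : Int), n.toNat ≤ k → ∀ (acc : List Char),
    pvLoopA n acc = pvDigits n ++ acc := by
  intro k
  induction k with
  | zero =>
    intro n hn acc
    rw [pvLoopA, pvDigits, if_neg (by omega), if_neg (by omega)]
    simp
  | succ k ih =>
    intro n hn acc
    rw [pvLoopA, pvDigits]
    by_cases h : 0 < n
    · rw [if_pos h, if_pos h]
      rw [ih (PySem.Int.floordiv n 62)
            (by rw [PySem.Int.floordiv_eq_ediv_of_pos (by omega)]; omega)]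
      simp
    · rw [if_neg h, if_neg h]
      simp

-- Explicit digit window: pvD k n = digits (n // 62^k) % 62, …, (n // 62^0) % 62, most significant first.
def pvD : Nat → Int → List Char
  | 0, n => [PySem.List.pyGetD pvAlphabet (PySem.Int.mod n 62) ' ']
  | k + 1, n =>
      PySem.List.pyGetD pvAlphabet (PySem.Int.mod (PySem.Int.floordiv n (62 ^ (k + 1))) 62) ' ' :: pvD k n

theorem pvD_shift : ∀ (k : Nat) (n : Int), 0 ≤ n →
    pvD (k + 1) n = pvD k (PySem.Int.floordiv n 62)
      ++ [PySem.List.pyGetD pvAlphabet (PySem.Int.mod n 62) ' '] := by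
  intro k
  induction k with
  | zero =>
    intro n hn
    have h62 : (62 : Int) ^ (0 + 1) = 62 := by norm_num
    simp [pvD, h62]
  | succ k ih =>
    intro n hn
    have h1 : pvD (k + 1 + 1) n
        = PySem.List.pyGetD pvAlphabet (PySem.Int.mod (PySem.Int.floordiv n (62 ^ (k + 2))) 62) ' '
          :: pvD (k + 1) n := rfl
    rw [h1, ih n hn]
    have h2 : PySem.Int.floordiv n (62 ^ (k + 2))
        = PySem.Int.floordiv (PySem.Int.floordiv n 62) (62 ^ (k + 1)) := by
      rw [PySem.Int.floordiv_eq_ediv_of_pos (by positivity),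
          PySem.Int.floordiv_eq_ediv_of_pos (b := 62) (by omega),
          PySem.Int.floordiv_eq_ediv_of_pos (by positivity),
          Int.ediv_ediv_of_nonneg (by omega)]
      ring_nf
    rw [h2]
    rfl

-- B's second loop started at 62^k writes exactly the digit window pvD k n after acc.
theorem pvEmitB_eq_pvD : ∀ (k : Nat) (n : Int) (acc : List Char),
    pvEmitB ((62 : Int) ^ k) n acc = acc ++ pvD k n := by
  intro k
  induction k with
  | zero =>
    intro n acc
    rw [pvEmitB, if_pos (by norm_num)]
    rw [pvEmitB]
    have : PySem.Int.floordiv (1 : Int) 62 = 0 := by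
      rw [PySem.Int.floordiv_eq_ediv_of_pos (by omega)]; decide
    simp only [pow_zero] at *
    rw [this, if_neg (by omega)]
    have hd : PySem.Int.floordiv n 1 = n := by
      rw [PySem.Int.floordiv_eq_ediv_of_pos (by omega)]; simp
    simp [pvD]
  | succ k ih =>
    intro n acc
    rw [pvEmitB, if_pos (by positivity)]
    have hp : PySem.Int.floordiv ((62 : Int) ^ (k + 1)) 62 = (62 : Int) ^ k := by
      rw [PySem.Int.floordiv_eq_ediv_of_pos (by omega), pow_succ,
          Int.mul_ediv_cancel _ (by omega)]
    rw [hp, ih]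
    have : pvD (k + 1) n
        = PySem.List.pyGetD pvAlphabet (PySem.Int.mod (PySem.Int.floordiv n (62 ^ (k + 1))) 62) ' '
          :: pvD k n := rfl
    rw [this]
    simp

-- In the tight window 62^k ≤ n < 62^(k+1) the digit window is the canonical digit string.
theorem pvD_eq_digits : ∀ (k : Nat) (n : Int),
    (62 : Int) ^ k ≤ n → n < (62 : Int) ^ (k + 1) → pvD k n = pvDigits n := by
  intro k
  induction k with
  | zero =>
    intro n h1 h2
    simp only [pow_zero] at h1
    rw [pow_one] at h2
    rw [pvDigits, if_pos (by omega)]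
    have h0 : PySem.Int.floordiv n 62 = 0 := by
      rw [PySem.Int.floordiv_eq_ediv_of_pos (by omega)]
      omega
    rw [h0, pvDigits, if_neg (by omega)]
    rfl
  | succ k ih =>
    intro n h1 h2
    have hn : 0 ≤ n := le_trans (by positivity) h1
    rw [pvD_shift k n hn, pvDigits, if_pos (lt_of_lt_of_le (by positivity) h1)]
    congr 1
    apply ih
    · rw [PySem.Int.floordiv_eq_ediv_of_pos (by omega)]
      rw [pow_succ] at h1
      exact Int.le_ediv_iff_mul_le (by omega) |>.mpr (by linarith)
    · rw [PySem.Int.floordiv_eq_ediv_of_pos (by omega)]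
      rw [pow_succ] at h2
      exact Int.ediv_lt_iff_lt_mul (by omega) |>.mpr (by linarith)

-- B's first loop, started at a power of 62 not exceeding n, returns the largest power of 62 not exceeding n.
theorem pvPowB_spec : ∀ (f : Nat) (p n : Int) (hp : 0 < p), (n - p).toNat ≤ f → p ≤ n →
    (∃ j : Nat, p = (62 : Int) ^ j) →
    ∃ k : Nat, pvPowB p n hp = (62 : Int) ^ k ∧ (62 : Int) ^ k ≤ n ∧ n < (62 : Int) ^ (k + 1) := by
  intro f
  induction f with
  | zero =>
    intro p n hp hf hpn ⟨j, hj⟩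
    rw [pvPowB, dif_neg (by omega)]
    exact ⟨j, hj, hj ▸ hpn, by subst hj; rw [pow_succ]; omega⟩
  | succ f ih =>
    intro p n hp hf hpn ⟨j, hj⟩
    rw [pvPowB]
    by_cases h : p * 62 ≤ n
    · rw [dif_pos h]
      exact ih (p * 62) n (by omega) (by omega) h ⟨j + 1, by rw [pow_succ, hj]⟩
    · rw [dif_neg h]
      exact ⟨j, hj, hj ▸ hpn, by subst hj; rw [pow_succ]; omega⟩

-- ===== VERDICT (by name: the statement is the Claim_ definition above) =====
theorem decimal_to_base62_spec : Claim_equal_decimal_to_base62 := by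
  intro d _ hpre
  unfold Spec_decimal_to_base62 decimal_to_base62 decimal_to_base62_alt
  by_cases h : d = 0
  · simp [h]
  · rw [if_neg h, if_neg h]
    have hd : 1 ≤ d := by unfold Pre_decimal_to_base62 at hpre; omega
    obtain ⟨k, hk, hk1, hk2⟩ :=
      pvPowB_spec (d - 1).toNat 1 d (by omega) (by omega) hd ⟨0, by norm_num⟩
    rw [pvLoopA_eq_digits d.toNat d le_rfl, List.append_nil, hk,
        pvEmitB_eq_pvD, List.nil_append, pvD_eq_digits k d hk1 hk2]
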